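-- pv_equiv track=rewrite | github.com/NiltonMocelin/feature_extraction | main_blocos_cython.py | modelar_dados_csv
-- ===== SOURCE A (Python) =====
-- def modelar_dados_csv(valores):
--     resultados_str = ""
--     contador = 0
--     for val in valores:
--         if contador < 5: # os cinco primeiros campos sao str
--             contador +=1
--             resultados_str+= f',"{val}"'
--         else:
--             resultados_str+= f',{val}'
--     return resultados_str.replace(',',"",1)
-- ===== SOURCE B (Python) =====
-- def modelar_dados_csv(valores):
--     vals = list(valores)
--     parts = [f'"{v}"' for v in vals[:5]] + [f'{v}' for v in vals[5:]]
--     return ','.join(parts)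
-- ===== Notes on version B (the rewrite author's own statement) =====
-- stated objective: simpler
-- what changed: Replaces the stateful counter loop with leading-comma stripping by a split of the list at index 5 into two homogeneous segments (quoted / plain) joined once with ','.join.
import Mathlib
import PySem

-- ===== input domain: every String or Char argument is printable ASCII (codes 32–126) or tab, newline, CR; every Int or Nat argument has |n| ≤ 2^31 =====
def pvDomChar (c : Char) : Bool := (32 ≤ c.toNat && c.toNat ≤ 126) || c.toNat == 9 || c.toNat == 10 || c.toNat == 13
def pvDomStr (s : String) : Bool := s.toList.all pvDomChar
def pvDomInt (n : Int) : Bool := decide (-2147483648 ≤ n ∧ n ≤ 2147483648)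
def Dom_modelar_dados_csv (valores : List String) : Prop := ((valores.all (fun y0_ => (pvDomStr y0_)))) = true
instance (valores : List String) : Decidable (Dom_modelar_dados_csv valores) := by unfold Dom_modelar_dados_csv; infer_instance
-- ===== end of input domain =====

-- B replaces A's counter/branch loop plus leading-comma replace by splitting the list at index 5
-- into a quoted segment and a plain segment joined once (objective: simpler).

-- ===== PORT A =====
-- hand port of resultados_str.replace(",", "", 1): exact here because old is the single char ',' and new is ""
def pvReplaceCommaOnce : List Char → List Char
  | [] => []
  | c :: cs => if c = ',' then cs else c :: pvReplaceCommaOnce cs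

-- loop body of A: state = (resultados_str, contador)
def pvStepA (st : List Char × Nat) (val : String) : List Char × Nat :=
  if st.2 < 5 then (st.1 ++ (',' :: '"' :: (val.toList ++ ['"'])), st.2 + 1)
  else (st.1 ++ (',' :: val.toList), st.2)

def modelar_dados_csv (valores : List String) : String :=
  let r := valores.foldl pvStepA ([], 0)
  String.ofList (pvReplaceCommaOnce r.1)

-- ===== PORT B =====
def modelar_dados_csv_alt (valores : List String) : String :=
  let vals := valores
  let parts := (vals.take 5).map (fun v => '"' :: (v.toList ++ ['"'])) ++ (vals.drop 5).map String.toList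
  String.ofList (PySem.Chars.join [','] parts)

-- ===== PRECONDITION & SPEC =====
def Spec_modelar_dados_csv (valores : List String) (out : String) : Prop := out = modelar_dados_csv_alt valores
instance (valores : List String) (out : String) : Decidable (Spec_modelar_dados_csv valores out) := by unfold Spec_modelar_dados_csv; infer_instance

-- ===== CLAIM (what is proved, stated in full; the proofs are below) =====
def Claim_equal_modelar_dados_csv : Prop := ∀ (valores : List String), Dom_modelar_dados_csv valores → Spec_modelar_dados_csv valores (modelar_dados_csv valores)

-- ===== LEMMAS AND PROOFS =====

-- the string A's loop appends after state (acc, c)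
def pvTail : List String → Nat → List Char
  | [], _ => []
  | v :: vs, c =>
    (if c < 5 then ',' :: '"' :: (v.toList ++ ['"']) else ',' :: v.toList) ++
      pvTail vs (if c < 5 then c + 1 else c)

theorem pvFold_fst (vs : List String) (acc : List Char) (c : Nat) :
    (vs.foldl pvStepA (acc, c)).1 = acc ++ pvTail vs c := by
  induction vs generalizing acc c with
  | nil => simp [pvTail]
  | cons v vs ih =>
    by_cases h : c < 5 <;> simp [pvTail, pvStepA, h, ih, List.append_assoc]

theorem pvTail_eq (vs : List String) (c : Nat) (h : c ≤ 5) :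
    pvTail vs c =
      ((vs.take (5 - c)).map (fun v => '"' :: (v.toList ++ ['"'])) ++
        (vs.drop (5 - c)).map String.toList).flatMap (fun p => ',' :: p) := by
  induction vs generalizing c with
  | nil => simp [pvTail]
  | cons v vs ih =>
    by_cases hc : c < 5
    · have h5 : 5 - c = (5 - (c + 1)) + 1 := by omega
      simp [pvTail, hc, h5, ih (c + 1) (by omega), List.append_assoc]
    · have hc5 : c = 5 := by omega
      subst hc5
      simp [pvTail, ih 5 (by omega)]

theorem pvJoin_of_flatMap (ps : List (List Char)) (p : List Char) :
    p ++ ps.flatMap (fun q => ',' :: q) = PySem.Chars.join [','] (p :: ps) := by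
  induction ps generalizing p with
  | nil => simp [PySem.Chars.join_singleton]
  | cons q qs ih =>
    rw [PySem.Chars.join_cons_cons, ← ih q]
    simp

theorem pvReplace_flatMap (parts : List (List Char)) :
    pvReplaceCommaOnce (parts.flatMap (fun p => ',' :: p)) = PySem.Chars.join [','] parts := by
  cases parts with
  | nil => simp [pvReplaceCommaOnce, PySem.Chars.join, List.intercalate]
  | cons p ps =>
    rw [← pvJoin_of_flatMap ps p]
    simp [pvReplaceCommaOnce]

-- ===== VERDICT (by name: the statement is the Claim_ definition above) =====
theorem modelar_dados_csv_spec : Claim_equal_modelar_dados_csv := by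
  intro valores _
  unfold Spec_modelar_dados_csv modelar_dados_csv modelar_dados_csv_alt
  simp only []
  rw [pvFold_fst valores [] 0]
  rw [pvTail_eq valores 0 (by omega), show (5:Nat) - 0 = 5 from rfl, List.nil_append, pvReplace_flatMap]
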